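-- pv_equiv track=rewrite | github.com/akent4000/Universal-Gate-Compiler | nand_optimizer/synthesis/bidec.py | _expand_tt_to_4
-- ===== SOURCE A (Python) =====
-- def _expand_tt_to_4(tt: int, m: int) -> int:
--     """Replicate an m-input TT (m in 0..4) into the 16-bit 4-input format."""
--     if m >= 4:
--         return tt & 0xFFFF
--     tt &= (1 << (1 << m)) - 1
--     chunk = 1 << m
--     for _ in range(4 - m):
--         tt |= tt << chunk
--         chunk <<= 1
--     return tt & 0xFFFF
-- ===== SOURCE B (Python) =====
-- def _expand_tt_to_4(tt: int, m: int) -> int: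
--     if m >= 4:
--         return tt & 0xFFFF
--     w = 1 << m
--     mask = (1 << w) - 1
--     return ((tt & mask) * (0xFFFF // mask)) & 0xFFFF
-- ===== Notes on version B (the rewrite author's own statement) =====
-- stated objective: simpler
-- what changed: Replaces A's iterative doubling loop (tt |= tt << chunk, repeated 4-m times) with a single closed-form multiplication of the masked pattern by the repunit constant 0xFFFF // mask.
import Mathlib
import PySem

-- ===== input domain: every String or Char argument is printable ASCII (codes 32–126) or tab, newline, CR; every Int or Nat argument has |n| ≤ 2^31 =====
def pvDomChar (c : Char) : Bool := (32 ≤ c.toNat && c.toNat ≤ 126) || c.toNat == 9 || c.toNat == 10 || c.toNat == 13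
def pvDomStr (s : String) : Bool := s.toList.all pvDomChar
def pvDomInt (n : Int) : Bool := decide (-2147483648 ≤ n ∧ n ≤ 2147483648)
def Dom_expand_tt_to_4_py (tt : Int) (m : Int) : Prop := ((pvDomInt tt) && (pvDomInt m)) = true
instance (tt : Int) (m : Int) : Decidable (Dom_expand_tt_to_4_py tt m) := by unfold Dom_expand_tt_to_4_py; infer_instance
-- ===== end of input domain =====

-- B replaces A's doubling loop by a single multiplication with the repunit 0xFFFF // mask (objective: simpler).

-- ===== PORT A =====
-- loop body of A: 'for _ in range(4 - m): tt |= tt << chunk; chunk <<= 1'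
def pvLoopA : Nat → Int → Int → Int
  | 0, tt, _ => tt
  | n + 1, tt, chunk => pvLoopA n (PySem.Int.bor tt (tt <<< chunk.toNat)) (chunk <<< 1)

def expand_tt_to_4_py (tt : Int) (m : Int) : Int :=
  if m ≥ 4 then PySem.Int.band tt 0xFFFF
  else
    let tt1 := PySem.Int.band tt ((1 <<< ((1:Int) <<< m.toNat).toNat) - 1)
    let chunk : Int := 1 <<< m.toNat
    PySem.Int.band (pvLoopA (4 - m).toNat tt1 chunk) 0xFFFF

-- ===== PORT B =====
def expand_tt_to_4_py_alt (tt : Int) (m : Int) : Int :=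
  if m ≥ 4 then PySem.Int.band tt 0xFFFF
  else
    let w : Int := 1 <<< m.toNat
    let mask : Int := (1 <<< w.toNat) - 1
    PySem.Int.band (PySem.Int.band tt mask * PySem.Int.floordiv 0xFFFF mask) 0xFFFF

-- ===== PRECONDITION & SPEC =====
-- Python raises ValueError ('negative shift count') for m < 0, in A and in B alike.
def Pre_expand_tt_to_4_py (tt : Int) (m : Int) : Prop := 0 ≤ m
instance (tt : Int) (m : Int) : Decidable (Pre_expand_tt_to_4_py tt m) := by unfold Pre_expand_tt_to_4_py; infer_instance
def pvWitness_expand_tt_to_4_py : Int × Int := (5, 2)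

def Spec_expand_tt_to_4_py (tt : Int) (m : Int) (out : Int) : Prop := out = expand_tt_to_4_py_alt tt m
instance (tt : Int) (m : Int) (out : Int) : Decidable (Spec_expand_tt_to_4_py tt m out) := by unfold Spec_expand_tt_to_4_py; infer_instance

-- ===== CLAIM (what is proved, stated in full; the proofs are below) =====
def Claim_equal_expand_tt_to_4_py : Prop := ∀ (tt : Int) (m : Int), Dom_expand_tt_to_4_py tt m → Pre_expand_tt_to_4_py tt m → Spec_expand_tt_to_4_py tt m (expand_tt_to_4_py tt m)

-- ===== LEMMAS AND PROOFS =====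

-- Python's tt & mask, for a Nat mask, lies in [0, mask].
theorem pv_band_bound (tt : Int) (mk : Nat) :
    0 ≤ PySem.Int.band tt (mk : Int) ∧ PySem.Int.band tt (mk : Int) ≤ (mk : Int) := by
  unfold PySem.Int.band
  split_ifs with h1 h2 h3
  · constructor
    · positivity
    · have : tt.toNat &&& ((mk : Int)).toNat ≤ ((mk : Int)).toNat := Nat.and_le_right
      simpa using this
  · omega
  · have : ((mk : Int)).toNat - (((mk : Int)).toNat &&& (-tt - 1).toNat) ≤ ((mk : Int)).toNat :=
      Nat.sub_le _ _
    constructor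
    · positivity
    · simpa using this
  · omega

theorem pv_case (tt : Int) (mk : Nat)
    (f g : Int → Int)
    (hfg : ∀ x : Int, 0 ≤ x → x ≤ (mk : Int) → f x = g x) :
    f (PySem.Int.band tt (mk : Int)) = g (PySem.Int.band tt (mk : Int)) := by
  obtain ⟨h0, h1⟩ := pv_band_bound tt mk
  exact hfg _ h0 h1

-- ===== VERDICT (by name: the statement is the Claim_ definition above) =====
theorem expand_tt_to_4_py_spec : Claim_equal_expand_tt_to_4_py := by
  intro tt m hd hp
  unfold Spec_expand_tt_to_4_py expand_tt_to_4_py expand_tt_to_4_py_alt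
  unfold Pre_expand_tt_to_4_py at hp
  by_cases h4 : m ≥ 4
  · simp [h4]
  · have hm : m = 0 ∨ m = 1 ∨ m = 2 ∨ m = 3 := by omega
    simp only [if_neg h4]
    rcases hm with rfl | rfl | rfl | rfl
    · exact pv_case tt 1         (fun x => PySem.Int.band (pvLoopA 4 x 1) 0xFFFF)
        (fun x => PySem.Int.band (x * PySem.Int.floordiv 0xFFFF 1) 0xFFFF)
        (by intro x h0 h1; interval_cases x <;> decide)
    · exact pv_case tt 3         (fun x => PySem.Int.band (pvLoopA 3 x 2) 0xFFFF)
        (fun x => PySem.Int.band (x * PySem.Int.floordiv 0xFFFF 3) 0xFFFF)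
        (by intro x h0 h1; interval_cases x <;> decide)
    · exact pv_case tt 15         (fun x => PySem.Int.band (pvLoopA 2 x 4) 0xFFFF)
        (fun x => PySem.Int.band (x * PySem.Int.floordiv 0xFFFF 15) 0xFFFF)
        (by intro x h0 h1; interval_cases x <;> decide)
    · exact pv_case tt 255         (fun x => PySem.Int.band (pvLoopA 1 x 8) 0xFFFF)
        (fun x => PySem.Int.band (x * PySem.Int.floordiv 0xFFFF 255) 0xFFFF)
        (by intro x h0 h1; interval_cases x <;> decide)
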